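-- pv_equiv track=rewrite | github.com/barsauskasalius/first_program | Codewars/7kyu/Rearange Number to Get its Maximum.py | max_redigit
-- ===== SOURCE A (Python) =====
-- def max_redigit(num):
--     str_num = str(num)
--     if  len(str_num)==3 and num > 0:
--         num_list = list(map(int, str(num)))
--
--         num_list.sort(reverse=True)
--
--         strings = [str(integer) for integer in num_list]
--         a_string = "".join(strings)
--         an_integer = int(a_string)
--         return an_integer
--     else:
--         return None
-- ===== SOURCE B (Python) =====
-- def max_redigit(num):
--     # Counting sort: tally the three digits, then emit them from 9 down to 0.
--     if not (100 <= num <= 999):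
--         return None
--     counts = [0] * 10
--     for d in (num // 100, num // 10 % 10, num % 10):
--         counts[d] += 1
--     val = 0
--     for d in range(9, -1, -1):
--         for _ in range(counts[d]):
--             val = val * 10 + d
--     return val
-- ===== Notes on version B (the rewrite author's own statement) =====
-- stated objective: alternative
-- what changed: Replaces str-conversion + list.sort + join + int round-trip by pure integer arithmetic: extract the three digits with // and %, tally them in a 10-bucket counting table, and rebuild the number by emitting digits from 9 down to 0.
import Mathlib
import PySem

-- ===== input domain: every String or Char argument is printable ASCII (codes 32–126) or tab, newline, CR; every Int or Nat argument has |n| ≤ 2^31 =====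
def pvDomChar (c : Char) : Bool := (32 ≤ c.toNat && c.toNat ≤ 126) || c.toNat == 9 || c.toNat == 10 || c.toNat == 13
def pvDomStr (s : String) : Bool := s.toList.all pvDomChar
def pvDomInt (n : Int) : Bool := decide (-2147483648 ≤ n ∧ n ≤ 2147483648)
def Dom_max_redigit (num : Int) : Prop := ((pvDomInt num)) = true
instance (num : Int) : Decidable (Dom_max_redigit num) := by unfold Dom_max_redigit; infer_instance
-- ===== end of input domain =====

-- B replaces A's string sort (str → sort digits → join → int) by arithmetic digit
-- extraction plus a 10-bucket counting sort emitted from 9 down to 0 (alternative, same cost).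


-- ===== PORT A =====
def max_redigit (num : Int) : Option Int :=
  let str_num := PySem.Int.toChars num
  if str_num.length = 3 ∧ 0 < num then
    -- int(c) on a single character; inside the guard every character is a digit,
    -- so ofChars? is always `some` and the default 0 is unreachable
    let num_list := str_num.map (fun c => (PySem.Int.ofChars? [c]).getD 0)
    let sorted_list := PySem.List.sorted num_list (fun x => x) true
    let strings := sorted_list.map (fun i => PySem.Int.toChars i)
    let a_string := PySem.Chars.join [] strings
    PySem.Int.ofChars? a_string   -- int(a_string); always `some` inside the guard
  else none

-- ===== PORT B =====
def max_redigit_alt (num : Int) : Option Int :=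
  if 100 ≤ num ∧ num ≤ 999 then
    let counts : List Int :=
      [PySem.Int.floordiv num 100, PySem.Int.mod (PySem.Int.floordiv num 10) 10,
        PySem.Int.mod num 10].foldl
        (fun cs d => PySem.List.pySetD cs d (PySem.List.pyGetD cs d 0 + 1)) (List.replicate 10 0)
    let val := (PySem.List.pyRange 9 (-1) (-1)).foldl
      (fun v d => (List.range (PySem.List.pyGetD counts d 0).toNat).foldl
        (fun v _ => v * 10 + d) v) 0
    some val
  else none

-- ===== PRECONDITION & SPEC =====
def Spec_max_redigit (num : Int) (out : Option Int) : Prop := out = max_redigit_alt num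
instance (num : Int) (out : Option Int) : Decidable (Spec_max_redigit num out) := by unfold Spec_max_redigit; infer_instance

-- ===== CLAIM (what is proved, stated in full; the proofs are below) =====
def Claim_equal_max_redigit : Prop := ∀ (num : Int), Dom_max_redigit num → Spec_max_redigit num (max_redigit num)

-- ===== LEMMAS AND PROOFS =====

-- fuel irrelevance of Nat.toDigitsCore: any fuel above the value gives the same digits
theorem pv_tdc_fuel : ∀ (n f₁ f₂ : Nat) (acc : List Char), n < f₁ → n < f₂ →
    Nat.toDigitsCore 10 f₁ n acc = Nat.toDigitsCore 10 f₂ n acc := by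
  intro n
  induction n using Nat.strong_induction_on with
  | _ n ih =>
    intro f₁ f₂ acc h1 h2
    match f₁, f₂ with
    | f₁ + 1, f₂ + 1 =>
      simp only [Nat.toDigitsCore]
      split
      · rfl
      · rename_i hne
        exact ih (n / 10) (Nat.div_lt_self (by omega) (by omega)) f₁ f₂ _
          (by have := Nat.div_lt_self (n := n) (by omega) (show 1 < 10 by omega); omega)
          (by have := Nat.div_lt_self (n := n) (by omega) (show 1 < 10 by omega); omega)

-- one decimal digit is peeled per division by 10
theorem pv_toDigits_step (n : Nat) (h : 10 ≤ n) :
    (Nat.toDigits 10 n).length = (Nat.toDigits 10 (n / 10)).length + 1 := by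
  have hne : n / 10 ≠ 0 := by
    omega
  show (Nat.toDigitsCore 10 (n + 1) n []).length = _
  simp only [Nat.toDigitsCore]
  rw [if_neg hne]
  rw [Nat.toDigitsCore_lens_eq]
  rw [pv_tdc_fuel (n / 10) n (n / 10 + 1) [] (Nat.div_lt_self (by omega) (by omega)) (by omega)]
  rfl

theorem pv_toDigits_len_pos (n : Nat) : 1 ≤ (Nat.toDigits 10 n).length := by
  show 1 ≤ (Nat.toDigitsCore 10 (n + 1) n []).length
  simp only [Nat.toDigitsCore]
  split
  · simp
  · rw [Nat.toDigitsCore_lens_eq]; omega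

-- a number ≥ 1000 has at least four decimal digits
theorem pv_toDigits_len_ge_four (n : Nat) (h : 1000 ≤ n) : 4 ≤ (Nat.toDigits 10 n).length := by
  rw [pv_toDigits_step n (by omega)]
  rw [pv_toDigits_step (n / 10) (by omega)]
  rw [pv_toDigits_step (n / 10 / 10) (by omega)]
  have := pv_toDigits_len_pos (n / 10 / 10 / 10)
  omega

-- the full equivalence on the 900 inputs that pass A's guard, by kernel evaluation
set_option maxRecDepth 8192 in
set_option maxHeartbeats 4000000 in
theorem pv_main_range : ∀ k : Fin 900,
    max_redigit (100 + (k.1 : Int)) = max_redigit_alt (100 + (k.1 : Int)) := by decide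

-- ===== VERDICT (by name: the statement is the Claim_ definition above) =====
theorem max_redigit_spec : Claim_equal_max_redigit := by
  intro num _
  unfold Spec_max_redigit
  by_cases h : 100 ≤ num ∧ num ≤ 999
  · have hk : (num - 100).toNat < 900 := by omega
    have := pv_main_range ⟨(num - 100).toNat, hk⟩
    have hnum : (100 : Int) + ((num - 100).toNat : Int) = num := by omega
    rwa [hnum] at this
  · -- both sides are none
    rw [max_redigit_alt, if_neg h]
    rw [max_redigit]
    rw [if_neg]
    rintro ⟨h3, hpos⟩
    have hch : PySem.Int.toChars num = Nat.toDigits 10 num.toNat := by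
      unfold PySem.Int.toChars
      rw [if_neg (by omega)]
    rw [hch] at h3
    rcases Int.lt_or_le num 100 with hlt | hge
    · have : (Nat.toDigits 10 num.toNat).length ≤ 2 :=
        Nat.toDigits_length 10 num.toNat 2 (by omega) (by omega)
      omega
    · have h1000 : 1000 ≤ num := by omega
      have : 4 ≤ (Nat.toDigits 10 num.toNat).length :=
        pv_toDigits_len_ge_four num.toNat (by omega)
      omega
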